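-- pv_equiv track=rewrite | github.com/hemantacharya1/assignment_misogi | Week4/Day3/q3/utils/tokenizer.py | get_token_positions
-- ===== SOURCE A (Python) =====
-- from typing import List, Optional
--
-- def get_token_positions(text: str) -> List[tuple]:
--     """Get character positions for each token."""
--     if not text:
--         return []
--
--     # Simple word-based position tracking
--     words = text.split()
--     positions = []
--     current_pos = 0
--
--     for word in words:
--         start_pos = text.find(word, current_pos)
--         end_pos = start_pos + len(word)
--         positions.append((start_pos, end_pos))
--         current_pos = end_pos
--
--     return positions
-- ===== SOURCE B (Python) =====
-- def get_token_positions(text: str) -> list: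
--     """Single left-to-right character scan; no split(), no find()."""
--     positions = []
--     in_token = False
--     start = 0
--     for i, ch in enumerate(text):
--         if not ch.isspace():
--             if not in_token:
--                 start = i
--                 in_token = True
--         else:
--             if in_token:
--                 positions.append((start, i))
--                 in_token = False
--     if in_token:
--         positions.append((start, len(text)))
--     return positions
-- ===== Notes on version B (the rewrite author's own statement) =====
-- stated objective: alternative
-- what changed: Replaced split() plus a text.find scan per word with a single left-to-right character scan maintaining an in_token flag and a start index, emitting each (start, end) span directly.
import Mathlib
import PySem

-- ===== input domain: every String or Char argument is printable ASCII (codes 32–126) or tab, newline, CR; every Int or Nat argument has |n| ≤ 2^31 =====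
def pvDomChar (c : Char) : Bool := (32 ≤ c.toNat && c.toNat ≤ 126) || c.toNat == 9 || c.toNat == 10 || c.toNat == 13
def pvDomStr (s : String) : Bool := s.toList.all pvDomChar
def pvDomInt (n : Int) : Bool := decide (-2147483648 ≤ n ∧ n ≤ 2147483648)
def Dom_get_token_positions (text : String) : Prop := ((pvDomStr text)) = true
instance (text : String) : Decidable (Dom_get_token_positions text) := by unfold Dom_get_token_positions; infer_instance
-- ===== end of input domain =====

-- B replaces split() + repeated text.find with one left-to-right character scan emitting spans directly (objective: alternative single-pass algorithm; not measured faster).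

-- ===== PORT A =====
def get_token_positions (text : String) : List (Int × Int) :=
  if text.toList.isEmpty then []
  else
    let words := PySem.Str.split₀ text
    (words.foldl (fun (st : List (Int × Int) × Int) word =>
        let start_pos := PySem.Str.findFrom text word st.2 none
        let end_pos := start_pos + PySem.Str.len word
        (st.1 ++ [(start_pos, end_pos)], end_pos)) ([], 0)).1

-- ===== PORT B =====
def get_token_positions_alt (text : String) : List (Int × Int) :=
  let st := (PySem.List.enumerate text.toList 0).foldl
    (fun (s : List (Int × Int) × Bool × Int) ic =>
      if !(PySem.Chars.isspace ic.2) then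
        (if !s.2.1 then (s.1, true, ic.1) else s)
      else
        (if s.2.1 then (s.1 ++ [(s.2.2, ic.1)], false, s.2.2) else s))
    ([], false, 0)
  if st.2.1 then st.1 ++ [(st.2.2, PySem.Str.len text)] else st.1

-- ===== PRECONDITION & SPEC =====
def Spec_get_token_positions (text : String) (out : List (Int × Int)) : Prop := out = get_token_positions_alt text
instance (text : String) (out : List (Int × Int)) : Decidable (Spec_get_token_positions text out) := by unfold Spec_get_token_positions; infer_instance

-- ===== CLAIM (what is proved, stated in full; the proofs are below) =====
def Claim_equal_get_token_positions : Prop := ∀ (text : String), Dom_get_token_positions text → Spec_get_token_positions text (get_token_positions text)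

-- ===== LEMMAS AND PROOFS =====

-- Canonical tokenizer: the common description both ports are reduced to.
def pvTok (s : List Char) (i : Int) : List (Int × Int) :=
  match s with
  | [] => []
  | c :: rest =>
    if PySem.Chars.isspace c then pvTok rest (i + 1)
    else
      let w := (c :: rest).takeWhile (fun x => !PySem.Chars.isspace x)
      (i, i + (w.length : Int)) :: pvTok ((c :: rest).drop w.length) (i + (w.length : Int))
  termination_by s.length
  decreasing_by
    · simp
    · simp [List.takeWhile_cons, *]

-- general list fact not found in Mathlib under this phrasing
lemma pv_dropWhile_eq_drop (p : Char → Bool) (l : List Char) :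
    l.dropWhile p = l.drop (l.takeWhile p).length := by
  induction l with
  | nil => rfl
  | cons c rest ih =>
    by_cases h : p c
    · simp [List.dropWhile_cons, List.takeWhile_cons, h, ih]
    · simp [List.dropWhile_cons, List.takeWhile_cons, h]

-- ---- split₀ structure ----
lemma pv_split₀_go_acc (s : List Char) : ∀ cur acc,
    PySem.Chars.split₀.go s cur acc = acc.reverse ++ PySem.Chars.split₀.go s cur [] := by
  induction s with
  | nil => intro cur acc; by_cases h : cur.isEmpty <;> simp [PySem.Chars.split₀.go, h]
  | cons c rest ih =>
    intro cur acc
    by_cases h : PySem.Chars.isspace c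
    · by_cases hc : cur.isEmpty
      · simp only [PySem.Chars.split₀.go, h, hc, ite_true]
        exact ih [] acc
      · simp only [PySem.Chars.split₀.go, h, hc, ite_true, ite_false]
        rw [ih [] (cur.reverse :: acc), ih [] [cur.reverse]]
        simp
    · simp only [PySem.Chars.split₀.go, h]
      exact ih _ _

lemma pv_split₀_cons_space (c : Char) (rest : List Char) (h : PySem.Chars.isspace c = true) :
    PySem.Chars.split₀ (c :: rest) = PySem.Chars.split₀ rest := by
  simp [PySem.Chars.split₀, PySem.Chars.split₀.go, h]

lemma pv_split₀_go_word (s : List Char) : ∀ cur, cur ≠ [] →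
    PySem.Chars.split₀.go s cur [] =
      (cur.reverse ++ s.takeWhile (fun x => !PySem.Chars.isspace x)) ::
        PySem.Chars.split₀ (s.dropWhile (fun x => !PySem.Chars.isspace x)) := by
  induction s with
  | nil =>
    intro cur hc
    simp [PySem.Chars.split₀.go, PySem.Chars.split₀, List.isEmpty_iff, hc]
  | cons c rest ih =>
    intro cur hc
    by_cases h : PySem.Chars.isspace c
    · rw [show PySem.Chars.split₀.go (c :: rest) cur [] = PySem.Chars.split₀.go rest [] [cur.reverse] from by
        simp [PySem.Chars.split₀.go, h, List.isEmpty_iff, hc]]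
      rw [pv_split₀_go_acc]
      have ht : List.takeWhile (fun x => !PySem.Chars.isspace x) (c :: rest) = [] := by
        simp [List.takeWhile_cons, h]
      have hd : List.dropWhile (fun x => !PySem.Chars.isspace x) (c :: rest) = c :: rest := by
        simp [List.dropWhile_cons, h]
      rw [ht, hd, pv_split₀_cons_space c rest h]
      simp [PySem.Chars.split₀]
    · simp only [PySem.Chars.split₀.go, h, List.takeWhile_cons, List.dropWhile_cons,
        Bool.not_eq_true']
      rw [ih (c :: cur) (by simp)]
      simp [h]

lemma pv_split₀_cons_word (c : Char) (rest : List Char) (h : PySem.Chars.isspace c = false) :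
    PySem.Chars.split₀ (c :: rest) =
      ((c :: rest).takeWhile (fun x => !PySem.Chars.isspace x)) ::
        PySem.Chars.split₀ ((c :: rest).drop ((c :: rest).takeWhile (fun x => !PySem.Chars.isspace x)).length) := by
  rw [← pv_dropWhile_eq_drop]
  show PySem.Chars.split₀.go (c :: rest) [] [] = _
  simp only [PySem.Chars.split₀.go, h, Bool.false_eq_true, ite_false]
  rw [pv_split₀_go_word rest [c] (by simp)]
  simp [List.takeWhile_cons, List.dropWhile_cons, h]

-- ---- find through a whitespace prefix ----
lemma pv_find_go_space (m : Nat) : ∀ (s : List Char) (k : Nat) (d : Char) (t : List Char),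
    (∀ j (hj : j < s.length), j < m → PySem.Chars.isspace s[j] = true) →
    m ≤ s.length →
    (d :: t).isPrefixOf (s.drop m) = true →
    PySem.Chars.isspace d = false →
    PySem.Chars.find.go (d :: t) s k = (k + m : Nat) := by
  induction m with
  | zero =>
    intro s k d t _ _ hpre hd
    cases s with
    | nil => simp at hpre
    | cons x s' =>
      simp only [List.drop_zero] at hpre
      simp [PySem.Chars.find.go, hpre]
  | succ m ih =>
    intro s k d t hsp hm hpre hd
    cases s with
    | nil => simp at hm
    | cons x s' =>
      have hx : PySem.Chars.isspace x = true := hsp 0 (by simp) (by omega)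
      have hne : (d :: t).isPrefixOf (x :: s') = false := by
        simp only [List.isPrefixOf]
        have : d ≠ x := by rintro rfl; rw [hx] at hd; simp at hd
        simp [this]
      simp only [PySem.Chars.find.go, hne, Bool.false_eq_true, ite_false]
      have := ih s' (k + 1) d t
        (fun j hj hjm => by have := hsp (j + 1) (by simpa using hj) (by omega); simpa using this)
        (by simpa using hm) (by simpa using hpre) hd
      rw [this]; push_cast; ring_nf

-- ---- A's fold equals pvTok ----
lemma pv_A_main (L : List Char) : ∀ (n cur p : Nat) (ps : List (Int × Int)),
    n = L.length - cur → p ≤ cur → cur ≤ L.length →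
    (∀ j (hj : j < L.length), p ≤ j → j < cur → PySem.Chars.isspace L[j] = true) →
    ((PySem.Chars.split₀ (L.drop cur)).foldl (fun (st : List (Int × Int) × Int) w =>
        (st.1 ++ [(PySem.Chars.findFrom L w st.2 none,
                   PySem.Chars.findFrom L w st.2 none + (w.length : Int))],
         PySem.Chars.findFrom L w st.2 none + (w.length : Int))) (ps, (p : Int))).1
      = ps ++ pvTok (L.drop cur) cur := by
  intro n
  induction n using Nat.strong_induction_on with
  | _ n ih =>
    intro cur p ps hn hpc hcl hsp
    rcases hdrop : L.drop cur with _ | ⟨c, rest⟩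
    · simp [PySem.Chars.split₀, PySem.Chars.split₀.go, pvTok]
    · have hcur : cur < L.length := by
        by_contra h
        rw [List.drop_eq_nil_of_le (by omega)] at hdrop; simp at hdrop
      have hLc : L[cur] = c := by
        have h0 : (L.drop cur)[0]'(by simp [hdrop]) = c := by simp [hdrop]
        rw [List.getElem_drop] at h0; simpa using h0
      by_cases hc : PySem.Chars.isspace c
      · -- skip one whitespace char
        rw [pv_split₀_cons_space c rest hc]
        rw [show pvTok (c :: rest) (cur : Int) = pvTok rest ((cur : Int) + 1) from by
          rw [pvTok.eq_def]; simp [hc]]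
        have hrest : L.drop (cur + 1) = rest := by
          rw [← List.drop_drop, hdrop]; rfl
        have hmain := ih (L.length - (cur + 1)) (by omega) (cur + 1) p ps rfl (by omega) (by omega)
          (fun j hj hpj hjc => by
            rcases Nat.lt_or_ge j cur with h' | h'
            · exact hsp j hj hpj h'
            · have : j = cur := by omega
              subst this; rw [hLc]; exact hc)
        rw [hrest] at hmain
        rw [hmain]
        push_cast
        ring_nf
      · -- a word starts here
        rw [pv_split₀_cons_word c rest (by simpa using hc)]
        set w := (c :: rest).takeWhile (fun x => !PySem.Chars.isspace x) with hw
        have hwcons : w = c :: rest.takeWhile (fun x => !PySem.Chars.isspace x) := by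
          simp [hw, List.takeWhile_cons, hc]
        have hwlen1 : 1 ≤ w.length := by rw [hwcons]; simp
        have hwlenle : w.length ≤ (c :: rest).length := (List.takeWhile_prefix _).length_le
        have hdroplen : (c :: rest).length = L.length - cur := by
          rw [← hdrop]; simp
        -- findFrom L w p = cur
        have hfind : PySem.Chars.findFrom L w (p : Int) none = (cur : Int) := by
          rw [PySem.Chars.findFrom_natCast L w p (by omega)]
          have hgo : PySem.Chars.find (L.drop p) w = ((cur - p : Nat) : Int) := by
            show PySem.Chars.find.go w (L.drop p) 0 = _
            rw [hwcons]
            have := pv_find_go_space (cur - p) (L.drop p) 0 c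
              (rest.takeWhile (fun x => !PySem.Chars.isspace x))
              (fun j hj hjm => by
                rw [List.getElem_drop]
                exact hsp (p + j) (by simp at hj; omega) (by omega) (by omega))
              (by simp; omega)
              (by
                have hdd : (L.drop p).drop (cur - p) = L.drop cur := by
                  rw [List.drop_drop]; congr 1; omega
                rw [hdd, hdrop, ← hwcons]
                exact List.isPrefixOf_iff_prefix.mpr (by rw [hw]; exact List.takeWhile_prefix _))
              (by simpa using hc)
            simpa using this
          rw [hgo]
          have hcp : ((cur - p : Nat) : Int) = (cur : Int) - (p : Int) := by push_cast; omega
          rw [hcp]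
          have hne : ¬ ((cur : Int) - (p : Int) = -1) := by omega
          rw [if_neg hne]
          ring
        simp only [List.foldl_cons, hfind]
        have hdrop2 : L.drop (cur + w.length) = (c :: rest).drop w.length := by
          rw [← List.drop_drop, hdrop]
        have hmain := ih (L.length - (cur + w.length)) (by omega) (cur + w.length) (cur + w.length)
          (ps ++ [((cur : Int), (cur : Int) + (w.length : Int))]) rfl (by omega)
          (by simp only [List.length_cons] at hdroplen hwlenle; omega)
          (fun j hj h1 h2 => by omega)
        rw [hdrop2] at hmain
        have hcast : ((cur + w.length : Nat) : Int) = (cur : Int) + (w.length : Int) := by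
          push_cast; ring
        rw [hcast] at hmain
        rw [hmain]
        rw [show pvTok (c :: rest) (cur : Int)
              = ((cur : Int), (cur : Int) + (w.length : Int))
                  :: pvTok ((c :: rest).drop w.length) ((cur : Int) + (w.length : Int)) from by
          rw [pvTok.eq_def]
          simp only [hc, Bool.false_eq_true, ite_false, ← hw]]
        simp

-- ---- B's fold equals pvTok ----
def pvBStep (s : List (Int × Int) × Bool × Int) (ic : Int × Char) : List (Int × Int) × Bool × Int :=
  if !(PySem.Chars.isspace ic.2) then
    (if !s.2.1 then (s.1, true, ic.1) else s)
  else
    (if s.2.1 then (s.1 ++ [(s.2.2, ic.1)], false, s.2.2) else s)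

def pvBRun (rest : List Char) (i : Int) (ps : List (Int × Int)) (b : Bool) (s0 : Int) : List (Int × Int) :=
  let st := (PySem.List.enumerate rest i).foldl pvBStep (ps, b, s0)
  if st.2.1 then st.1 ++ [(st.2.2, i + (rest.length : Int))] else st.1

lemma pv_B_main (rest : List Char) : ∀ (i s0 : Int) (ps : List (Int × Int)),
    pvBRun rest i ps false s0 = ps ++ pvTok rest i
    ∧ pvBRun rest i ps true s0
        = ps ++ [(s0, i + ((rest.takeWhile (fun x => !PySem.Chars.isspace x)).length : Int))]
            ++ pvTok (rest.drop (rest.takeWhile (fun x => !PySem.Chars.isspace x)).length)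
                (i + ((rest.takeWhile (fun x => !PySem.Chars.isspace x)).length : Int)) := by
  induction rest with
  | nil =>
    intro i s0 ps
    constructor <;> simp [pvBRun, PySem.List.enumerate, pvTok]
  | cons c rest ih =>
    intro i s0 ps
    have hcons : ∀ (b : Bool) ps' s0',
        pvBRun (c :: rest) i ps' b s0'
          = pvBRun rest (i + 1) (pvBStep (ps', b, s0') (i, c)).1
              (pvBStep (ps', b, s0') (i, c)).2.1 (pvBStep (ps', b, s0') (i, c)).2.2 := by
      intro b ps' s0'
      simp only [pvBRun, PySem.List.enumerate_cons, List.foldl_cons, List.length_cons]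
      have : i + ((rest.length + 1 : Nat) : Int) = (i + 1) + (rest.length : Int) := by
        push_cast; ring
      rw [this]
    by_cases hc : PySem.Chars.isspace c
    · constructor
      · rw [hcons, show pvBStep (ps, false, s0) (i, c) = (ps, false, s0) from by
          simp [pvBStep, hc]]
        rw [(ih (i + 1) s0 ps).1]
        rw [show pvTok (c :: rest) i = pvTok rest (i + 1) from by rw [pvTok.eq_def]; simp [hc]]
      · rw [hcons, show pvBStep (ps, true, s0) (i, c) = (ps ++ [(s0, i)], false, s0) from by
          simp [pvBStep, hc]]
        rw [(ih (i + 1) s0 (ps ++ [(s0, i)])).1]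
        have ht : List.takeWhile (fun x => !PySem.Chars.isspace x) (c :: rest) = [] := by
          simp [List.takeWhile_cons, hc]
        rw [ht]
        simp only [List.length_nil, Nat.cast_zero, add_zero, List.drop_zero,
          show pvTok (c :: rest) i = pvTok rest (i + 1) from by rw [pvTok.eq_def]; simp [hc]]
    · have ht : List.takeWhile (fun x => !PySem.Chars.isspace x) (c :: rest)
          = c :: rest.takeWhile (fun x => !PySem.Chars.isspace x) := by
        simp [List.takeWhile_cons, hc]
      have htok : pvTok (c :: rest) i
          = (i, i + ((rest.takeWhile (fun x => !PySem.Chars.isspace x)).length + 1 : Int))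
              :: pvTok (rest.drop (rest.takeWhile (fun x => !PySem.Chars.isspace x)).length)
                  (i + ((rest.takeWhile (fun x => !PySem.Chars.isspace x)).length + 1 : Int)) := by
        rw [pvTok.eq_def]
        simp only [hc, Bool.false_eq_true, ite_false, ht]
        simp only [List.length_cons, List.drop_succ_cons]
        push_cast
        ring_nf
      constructor
      · rw [hcons, show pvBStep (ps, false, s0) (i, c) = (ps, true, i) from by
          simp [pvBStep, hc]]
        rw [(ih (i + 1) i ps).2, htok]
        have : i + 1 + ((rest.takeWhile (fun x => !PySem.Chars.isspace x)).length : Int)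
            = i + ((rest.takeWhile (fun x => !PySem.Chars.isspace x)).length + 1 : Int) := by ring
        rw [this]
        simp
      · rw [hcons, show pvBStep (ps, true, s0) (i, c) = (ps, true, s0) from by
          simp [pvBStep, hc]]
        rw [(ih (i + 1) s0 ps).2, ht]
        simp only [List.length_cons, List.drop_succ_cons]
        have : i + 1 + ((rest.takeWhile (fun x => !PySem.Chars.isspace x)).length : Int)
            = i + (((rest.takeWhile (fun x => !PySem.Chars.isspace x)).length + 1 : Nat) : Int) := by
          push_cast; ring
        rw [this]

lemma pv_B_eq_tok (text : String) : get_token_positions_alt text = pvTok text.toList 0 := by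
  have h : get_token_positions_alt text = pvBRun text.toList 0 [] false 0 := by
    unfold get_token_positions_alt pvBRun
    rw [show (fun (s : List (Int × Int) × Bool × Int) (ic : Int × Char) =>
        if !(PySem.Chars.isspace ic.2) then
          (if !s.2.1 then (s.1, true, ic.1) else s)
        else
          (if s.2.1 then (s.1 ++ [(s.2.2, ic.1)], false, s.2.2) else s)) = pvBStep from
      funext fun s => funext fun ic => rfl]
    simp [PySem.Str.len_eq]
  rw [h, (pv_B_main text.toList 0 0 []).1]
  simp

lemma pv_A_eq_tok (text : String) : get_token_positions text = pvTok text.toList 0 := by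
  unfold get_token_positions
  by_cases he : text.toList.isEmpty
  · rw [if_pos he]
    rw [List.isEmpty_iff] at he
    rw [he, pvTok]
  · rw [if_neg he]
    simp only [PySem.Str.findFrom_eq, PySem.Str.len_eq]
    have hfm := List.foldl_map (f := String.toList)
      (g := fun (st : List (Int × Int) × Int) (w : List Char) =>
        (st.1 ++ [(PySem.Chars.findFrom text.toList w st.2 none,
                   PySem.Chars.findFrom text.toList w st.2 none + (w.length : Int))],
         PySem.Chars.findFrom text.toList w st.2 none + (w.length : Int)))
      (l := PySem.Str.split₀ text) (init := (([] : List (Int × Int)), (0 : Int)))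
    rw [← hfm, PySem.Str.split₀_map_toList]
    have := pv_A_main text.toList text.toList.length 0 0 [] (by omega) (by omega) (by omega)
      (fun j hj h1 h2 => by omega)
    simpa using this

-- ===== VERDICT (by name: the statement is the Claim_ definition above) =====
theorem get_token_positions_spec : Claim_equal_get_token_positions := by
  intro text _
  unfold Spec_get_token_positions
  rw [pv_A_eq_tok, pv_B_eq_tok]
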